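-- pv_equiv track=rewrite | github.com/HenrikLovold/Yatzy-Contest | game.py | three_eq
-- ===== SOURCE A (Python) =====
-- def three_eq(dice):
--     """
--     Internal method evaluating dices for three equal
--
--     :param dice: the dices to be evaluated
--     """
--     for i in range(len(dice)):
--         cnt = 0
--         for j in range(len(dice)):
--             if i != j and dice[i] == dice[j]:
--                 cnt += 1
--         if cnt == 2:
--             return dice[i] * 3
--     return 0
-- ===== SOURCE B (Python) =====
-- def three_eq(dice):
--     """
--     Score three-of-a-kind: one pass builds a frequency table, then the first
--     value (in first-occurrence order) appearing exactly 3 times scores v*3.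
--     """
--     counts = {}
--     for d in dice:
--         counts[d] = counts.get(d, 0) + 1
--     for v, c in counts.items():
--         if c == 3:
--             return v * 3
--     return 0
-- ===== Notes on version B (the rewrite author's own statement) =====
-- stated objective: faster
-- what changed: Replaced A's nested O(n^2) index-pair scan (for each die, rescan all dice to count equals) with a single pass building a frequency dict, then a scan of the dict for the first value occurring exactly 3 times.
import Mathlib
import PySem

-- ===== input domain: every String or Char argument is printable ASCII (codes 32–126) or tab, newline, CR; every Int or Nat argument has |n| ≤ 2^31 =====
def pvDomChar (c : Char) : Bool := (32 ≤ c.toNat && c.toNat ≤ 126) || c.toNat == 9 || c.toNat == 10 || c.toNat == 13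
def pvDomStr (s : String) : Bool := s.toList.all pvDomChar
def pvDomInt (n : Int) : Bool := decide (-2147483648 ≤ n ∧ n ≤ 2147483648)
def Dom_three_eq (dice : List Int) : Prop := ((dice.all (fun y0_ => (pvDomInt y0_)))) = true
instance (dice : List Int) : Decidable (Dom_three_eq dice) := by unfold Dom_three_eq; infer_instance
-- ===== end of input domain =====

-- B replaces A's nested index-pair scan by a one-pass frequency dict followed by a scan of
-- the dict in first-insertion order (objective: faster — two linear passes instead of A's quadratic rescan).

-- ===== PORT A =====
-- outer 'for i in range(len(dice))' with early return; indices from range(len(dice)) are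
-- always in bounds, so dice[i] is exactly List.getD i 0 here
def threeEqLoop (dice : List Int) (i : Nat) : Int :=
  if _h : i < dice.length then
    if (List.range dice.length).foldl
        (fun c j => if i ≠ j ∧ dice.getD i 0 = dice.getD j 0 then c + 1 else c) (0 : Int) = 2 then
      dice.getD i 0 * 3
    else threeEqLoop dice (i + 1)
  else 0
termination_by dice.length - i

def three_eq (dice : List Int) : Int := threeEqLoop dice 0

-- ===== PORT B =====
def three_eq_alt (dice : List Int) : Int :=
  let counts : PySem.Dict Int Int :=
    dice.foldl (fun d x => d.insert x (d.getD x 0 + 1)) PySem.Dict.empty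
  match counts.items.find? (fun p => p.2 == 3) with
  | some p => p.1 * 3
  | none => 0

-- ===== PRECONDITION & SPEC =====
def Spec_three_eq (dice : List Int) (out : Int) : Prop := out = three_eq_alt dice
instance (dice : List Int) (out : Int) : Decidable (Spec_three_eq dice out) := by unfold Spec_three_eq; infer_instance

-- ===== CLAIM (what is proved, stated in full; the proofs are below) =====
def Claim_equal_three_eq : Prop := ∀ (dice : List Int), Dom_three_eq dice → Spec_three_eq dice (three_eq dice)

-- ===== LEMMAS AND PROOFS =====

-- counting the indices whose entry excludes i where the entry-at-i predicate holds: drops 1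
theorem countP_range_ne (n i : Nat) (P : Nat → Prop) [DecidablePred P] (hi : i < n) (hP : P i) :
    (List.range n).countP (fun j => decide (¬ i = j ∧ P j)) + 1
      = (List.range n).countP (fun j => decide (P j)) := by
  induction n with
  | zero => omega
  | succ m ih =>
    rw [List.range_succ, List.countP_append, List.countP_append]
    by_cases hc : i < m
    · have hrec := ih hc
      have hne : ¬ i = m := by omega
      have hs1 : List.countP (fun j => decide (¬ i = j ∧ P j)) [m]
          = List.countP (fun j => decide (P j)) [m] := by simp [hne]
      rw [hs1]; omega
    · have him : i = m := by omega
      subst him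
      have h1 : (List.range i).countP (fun j => decide (¬ i = j ∧ P j))
          = (List.range i).countP (fun j => decide (P j)) := by
        apply List.countP_congr
        intro x hx
        have hlt : x < i := List.mem_range.mp hx
        have hne : ¬ i = x := by omega
        simp [hne]
      have hs1 : List.countP (fun j => decide (¬ i = j ∧ P j)) [i] = 0 := by simp
      have hs2 : List.countP (fun j => decide (P j)) [i] = 1 := by simp [hP]
      rw [h1, hs1, hs2]

-- counting positions whose entry equals v counts the occurrences of v
theorem countP_range_getD (l : List Int) (v : Int) :
    (List.range l.length).countP (fun j => decide (l.getD j 0 = v)) = l.count v := by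
  induction l with
  | nil => simp
  | cons a t ih =>
    rw [List.length_cons, List.range_succ_eq_map, List.countP_cons, List.countP_map]
    simp only [Function.comp_def, List.getD_cons_succ, List.getD_cons_zero, List.count_cons]
    rw [ih]
    exact Nat.add_left_inj.mpr rfl

-- A's inner loop computes count(dice[i]) - 1
theorem cnt_eq (dice : List Int) (i : Nat) (hi : i < dice.length) :
    (List.range dice.length).foldl
      (fun c j => if i ≠ j ∧ dice.getD i 0 = dice.getD j 0 then c + 1 else c) (0 : Int) + 1
      = (dice.count (dice.getD i 0) : Int) := by
  rw [PySem.List.foldl_ite_add_one]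
  have h1 := countP_range_ne dice.length i (fun j => dice.getD i 0 = dice.getD j 0) hi rfl
  have h2 : (List.range dice.length).countP (fun j => decide (dice.getD i 0 = dice.getD j 0))
      = dice.count (dice.getD i 0) := by
    rw [← countP_range_getD dice (dice.getD i 0)]
    apply List.countP_congr
    intro x _
    simp [eq_comm]
  push_cast [← h2, ← h1]
  ring

-- A's outer loop is 'first remaining value occurring exactly 3 times, scored ×3'
theorem threeEqLoop_eq (dice : List Int) (i : Nat) :
    threeEqLoop dice i =
      match (dice.drop i).find? (fun v => (dice.count v : Int) == 3) with
      | some v => v * 3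
      | none => 0 := by
  induction i using threeEqLoop.induct dice with
  | case1 i hi hc2 =>
    simp only [dite_eq_ite] at hc2
    have hcnt := cnt_eq dice i hi
    have hc3 : (dice.count (dice.getD i 0) : Int) = 3 := by omega
    have hdrop : dice.drop i = dice.getD i 0 :: dice.drop (i + 1) := by
      rw [List.getD_eq_getElem dice 0 hi]
      exact (List.drop_eq_getElem_cons hi)
    rw [threeEqLoop]
    simp only [dif_pos hi, if_pos hc2]
    rw [hdrop, List.find?_cons, beq_iff_eq.mpr hc3]
  | case2 i hi hc2 ih =>
    simp only [dite_eq_ite] at hc2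
    have hcnt := cnt_eq dice i hi
    have hc3 : ¬ (dice.count (dice.getD i 0) : Int) = 3 := by omega
    have hdrop : dice.drop i = dice.getD i 0 :: dice.drop (i + 1) := by
      rw [List.getD_eq_getElem dice 0 hi]
      exact (List.drop_eq_getElem_cons hi)
    rw [threeEqLoop]
    simp only [dif_pos hi, if_neg hc2]
    rw [hdrop, List.find?_cons, beq_eq_false_iff_ne.mpr hc3]
    exact ih
  | case3 i hi =>
    rw [threeEqLoop]
    simp only [dif_neg hi]
    rw [List.drop_eq_nil_of_le (by omega)]
    simp

-- find? over the ordered dedup (Set built by add) equals find? over the list itself: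
-- a duplicate dropped by add is preceded (in s) by its first occurrence, which find? prefers
theorem find?_foldl_add (p : Int → Bool) (xs s : List Int) :
    (xs.foldl PySem.Set.add s).find? p = (s ++ xs).find? p := by
  induction xs generalizing s with
  | nil => simp
  | cons x t ih =>
    rw [List.foldl_cons, ih]
    unfold PySem.Set.add
    by_cases hmem : PySem.Set.contains s x = true
    · simp only [if_pos hmem]
      rw [List.find?_append, List.find?_append]
      by_cases hpx : p x = true
      · have hx : x ∈ s := by
          simpa [PySem.Set.contains] using hmem
        have : (s.find? p).isSome := List.find?_isSome.mpr ⟨x, hx, hpx⟩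
        cases hfind : s.find? p with
        | none => simp [hfind] at this
        | some y => simp
      · have hpx' : p x = false := by simpa using hpx
        rw [List.find?_cons, hpx']
    · simp only [if_neg hmem]
      simp

-- B computes the same canonical form: first value of dice occurring exactly 3 times, ×3
theorem three_eq_alt_canon (dice : List Int) :
    three_eq_alt dice =
      match dice.find? (fun v => (dice.count v : Int) == 3) with
      | some v => v * 3
      | none => 0 := by
  unfold three_eq_alt
  rw [PySem.Dict.foldl_insert_getD_add_one_eq_counter]
  simp only []
  rw [PySem.Dict.items_counter, List.find?_map]
  simp only [Function.comp_def]
  have := find?_foldl_add (fun v => ((dice.count v : Int) == 3)) dice []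
  simp only [List.nil_append] at this
  rw [show (PySem.Set.ofList dice) = dice.foldl PySem.Set.add [] from rfl, this]
  cases dice.find? (fun v => ((dice.count v : Int) == 3)) <;> simp

-- ===== VERDICT (by name: the statement is the Claim_ definition above) =====
theorem three_eq_spec : Claim_equal_three_eq := by
  intro dice _
  unfold Spec_three_eq
  rw [show three_eq dice = threeEqLoop dice 0 from rfl, threeEqLoop_eq dice 0,
      three_eq_alt_canon, List.drop_zero]
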